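-- pv_equiv track=rewrite | github.com/frc6357/robot_code_2022 | Vision/scripts/cap_process.py | extremeItems
-- ===== SOURCE A (Python) =====
-- def extremeItems(a, str_input):
--     Xs = [i[0] for i in a]
--     Ys = [i[1] for i in a]
--     if str_input == 'minXmaxY':
--         bucket = []
--         b = min(Xs)
--         for i, j in enumerate(a):
--             if b in j:
--                 bucket.append(a[i])
--         return [b, max(Ys)]
--     elif str_input == 'maxXmaxY':
--         bucket = []
--         b = max(Xs)
--         for i, j in enumerate(a):
--             if b in j:
--                 bucket.append(a[i])
--         return [b, max(Ys)]
-- ===== SOURCE B (Python) =====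
-- def extremeItems(a, str_input):
--     # single pass accumulating min x, max x, max y together (A makes several passes plus a dead bucket loop)
--     min_x = max_x = max_y = None
--     for p in a:
--         x, y = p[0], p[1]
--         if min_x is None or x < min_x:
--             min_x = x
--         if max_x is None or x > max_x:
--             max_x = x
--         if max_y is None or y > max_y:
--             max_y = y
--     if str_input == 'minXmaxY':
--         if min_x is None:
--             raise ValueError('min() arg is an empty sequence')
--         return [min_x, max_y]
--     elif str_input == 'maxXmaxY':
--         if max_x is None:
--             raise ValueError('max() arg is an empty sequence')
--         return [max_x, max_y]
-- ===== Notes on version B (the rewrite author's own statement) =====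
-- stated objective: alternative
-- what changed: One unconditional pass over a accumulates min x, max x and max y together, replacing A's two intermediate list comprehensions, separate min/max calls and dead bucket-building loop.
import Mathlib
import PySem

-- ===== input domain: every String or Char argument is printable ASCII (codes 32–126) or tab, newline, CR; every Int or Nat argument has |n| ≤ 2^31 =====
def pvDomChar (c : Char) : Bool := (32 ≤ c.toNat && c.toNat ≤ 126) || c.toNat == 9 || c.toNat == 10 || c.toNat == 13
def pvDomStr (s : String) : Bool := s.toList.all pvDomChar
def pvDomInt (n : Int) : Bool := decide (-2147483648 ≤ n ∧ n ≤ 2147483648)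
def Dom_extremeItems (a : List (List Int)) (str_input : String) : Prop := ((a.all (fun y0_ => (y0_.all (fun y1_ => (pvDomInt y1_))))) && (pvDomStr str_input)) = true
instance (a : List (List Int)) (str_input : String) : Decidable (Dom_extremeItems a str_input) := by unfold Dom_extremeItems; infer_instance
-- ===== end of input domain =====

-- B replaces A's two comprehensions, separate min/max calls and dead bucket loop by one
-- accumulating pass; equivalence is proved on inputs where A raises no exception (Pre_).

-- ===== PORT A =====
def extremeItems (a : List (List Int)) (str_input : String) : Option (List Int) :=
  match a.mapM (fun i => PySem.List.pyGet? i 0), a.mapM (fun i => PySem.List.pyGet? i 1) with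
  | some Xs, some Ys =>
    if str_input = "minXmaxY" then
      match PySem.List.min? Xs (fun x => x) with
      | some b =>
        let _bucket := (PySem.List.enumerate a).foldl
          (fun acc ij => if ij.2.contains b then acc ++ [ij.2] else acc) ([] : List (List Int))
        match PySem.List.max? Ys (fun y => y) with
        | some m => some [b, m]
        | none => none          -- max([]) raises ValueError: outside Pre_
      | none => none            -- min([]) raises ValueError: outside Pre_
    else if str_input = "maxXmaxY" then
      match PySem.List.max? Xs (fun x => x) with
      | some b =>
        let _bucket := (PySem.List.enumerate a).foldl
          (fun acc ij => if ij.2.contains b then acc ++ [ij.2] else acc) ([] : List (List Int))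
        match PySem.List.max? Ys (fun y => y) with
        | some m => some [b, m]
        | none => none
      | none => none
    else none
  | _, _ => none                -- i[0] / i[1] raises IndexError: outside Pre_

-- ===== PORT B =====
-- one loop step of Source B: update (min_x, max_x, max_y); `Option.elim` renders the
-- `is None` checks; a short row raises IndexError in Python (outside Pre_)
def pvStepB (st : Option Int × Option Int × Option Int) (p : List Int) :
    Option Int × Option Int × Option Int :=
  (PySem.List.pyGet? p 0).elim st (fun x =>
    (PySem.List.pyGet? p 1).elim st (fun y =>
      (some (st.1.elim x (fun m => if x < m then x else m)),
       some ((st.2.1).elim x (fun m => if x > m then x else m)),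
       some ((st.2.2).elim y (fun m => if y > m then y else m)))))

def extremeItems_alt (a : List (List Int)) (str_input : String) : Option (List Int) :=
  let st := a.foldl pvStepB (none, none, none)
  if str_input = "minXmaxY" then
    -- Source B raises ValueError when min_x is None (empty a): outside Pre_, none here
    st.1.bind (fun mn => (st.2.2).map (fun my => [mn, my]))
  else if str_input = "maxXmaxY" then
    (st.2.1).bind (fun mx => (st.2.2).map (fun my => [mx, my]))
  else none

-- ===== PRECONDITION & SPEC =====
-- Pre_ excludes exactly the inputs where A raises: a row shorter than 2 (IndexError in the
-- comprehensions) or an empty a with a recognised str_input (ValueError from min/max).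
def Pre_extremeItems (a : List (List Int)) (str_input : String) : Prop :=
  (∀ r ∈ a, 2 ≤ r.length) ∧
  ((str_input = "minXmaxY" ∨ str_input = "maxXmaxY") → a ≠ [])
instance (a : List (List Int)) (str_input : String) : Decidable (Pre_extremeItems a str_input) := by
  unfold Pre_extremeItems; infer_instance
def pvWitness_extremeItems : List (List Int) × String := ([[1, 2], [3, 4]], "minXmaxY")

def Spec_extremeItems (a : List (List Int)) (str_input : String) (out : Option (List Int)) : Prop := out = extremeItems_alt a str_input
instance (a : List (List Int)) (str_input : String) (out : Option (List Int)) : Decidable (Spec_extremeItems a str_input out) := by unfold Spec_extremeItems; infer_instance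

-- ===== CLAIM (what is proved, stated in full; the proofs are below) =====
def Claim_equal_extremeItems : Prop := ∀ (a : List (List Int)) (str_input : String), Dom_extremeItems a str_input → Pre_extremeItems a str_input → Spec_extremeItems a str_input (extremeItems a str_input)

-- ===== LEMMAS AND PROOFS =====

theorem pvGet0 (x : Int) (t : List Int) : PySem.List.pyGet? (x :: t) 0 = some x := by
  simp [PySem.List.pyGet?, PySem.List.pyIdx?]

theorem pvGet1 (x y : Int) (t : List Int) : PySem.List.pyGet? (x :: y :: t) 1 = some y := by
  simp [PySem.List.pyGet?, PySem.List.pyIdx?]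

def pvF0 (r : List Int) : Int := r.headI
def pvF1 (r : List Int) : Int := r.tail.headI

theorem pvRow (r : List Int) (h : 2 ≤ r.length) :
    PySem.List.pyGet? r 0 = some (pvF0 r) ∧ PySem.List.pyGet? r 1 = some (pvF1 r) := by
  match r with
  | [] => simp at h
  | [x] => simp at h
  | x :: y :: t => exact ⟨pvGet0 x (y :: t), pvGet1 x y t⟩

theorem pvMapM0 (a : List (List Int)) (h : ∀ r ∈ a, 2 ≤ r.length) :
    a.mapM (fun i => PySem.List.pyGet? i 0) = some (a.map pvF0) := by
  induction a with
  | nil => rfl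
  | cons r t ih =>
    simp only [List.mapM_cons, (pvRow r (h r (by simp))).1,
      ih (fun x hx => h x (by simp [hx]))]
    rfl

theorem pvMapM1 (a : List (List Int)) (h : ∀ r ∈ a, 2 ≤ r.length) :
    a.mapM (fun i => PySem.List.pyGet? i 1) = some (a.map pvF1) := by
  induction a with
  | nil => rfl
  | cons r t ih =>
    simp only [List.mapM_cons, (pvRow r (h r (by simp))).2,
      ih (fun x hx => h x (by simp [hx]))]
    rfl

theorem pvFoldB (a : List (List Int)) (m1 m2 m3 : Int) (h : ∀ r ∈ a, 2 ≤ r.length) :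
    a.foldl pvStepB (some m1, some m2, some m3) =
      (some ((a.map pvF0).foldl min m1), some ((a.map pvF0).foldl max m2),
       some ((a.map pvF1).foldl max m3)) := by
  induction a generalizing m1 m2 m3 with
  | nil => rfl
  | cons r t ih =>
    have hr := pvRow r (h r (by simp))
    have e1 : (if pvF0 r < m1 then pvF0 r else m1) = min m1 (pvF0 r) := by
      rcases lt_or_ge (pvF0 r) m1 with hlt | hge
      · simp [hlt, min_eq_right hlt.le]
      · simp [not_lt.mpr hge, min_eq_left hge]
    have e2 : (if pvF0 r > m2 then pvF0 r else m2) = max m2 (pvF0 r) := by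
      rcases lt_or_ge m2 (pvF0 r) with hlt | hge
      · simp [hlt, max_eq_right hlt.le]
      · simp [not_lt.mpr hge, max_eq_left hge]
    have e3 : (if pvF1 r > m3 then pvF1 r else m3) = max m3 (pvF1 r) := by
      rcases lt_or_ge m3 (pvF1 r) with hlt | hge
      · simp [hlt, max_eq_right hlt.le]
      · simp [not_lt.mpr hge, max_eq_left hge]
    simp only [List.foldl_cons, List.map_cons, pvStepB, hr.1, hr.2, Option.elim, e1, e2, e3]
    exact ih _ _ _ (fun x hx => h x (by simp [hx]))

-- ===== VERDICT (by name: the statement is the Claim_ definition above) =====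
theorem extremeItems_spec : Claim_equal_extremeItems := by
  intro a str_input _ hpre
  unfold Spec_extremeItems extremeItems extremeItems_alt
  obtain ⟨hlen, hne⟩ := hpre
  rw [pvMapM0 a hlen, pvMapM1 a hlen]
  by_cases h1 : str_input = "minXmaxY"
  · have ha : a ≠ [] := hne (Or.inl h1)
    match a, ha with
    | r :: t, _ =>
      have h2 : 2 ≤ r.length := hlen r (by simp)
      simp only [h1, List.map_cons, PySem.List.min?_id_cons, PySem.List.max?_id_cons]
      rw [List.foldl_cons]
      simp only [pvStepB, (pvRow r h2).1, (pvRow r h2).2, Option.elim]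
      rw [pvFoldB t (pvF0 r) (pvF0 r) (pvF1 r) (fun x hx => hlen x (by simp [hx]))]
      rfl
  · by_cases h2 : str_input = "maxXmaxY"
    · have ha : a ≠ [] := hne (Or.inr h2)
      match a, ha with
      | r :: t, _ =>
        have hr2 : 2 ≤ r.length := hlen r (by simp)
        simp only [h2, List.map_cons, PySem.List.min?_id_cons, PySem.List.max?_id_cons]
        rw [List.foldl_cons]
        simp only [pvStepB, (pvRow r hr2).1, (pvRow r hr2).2, Option.elim]
        rw [pvFoldB t (pvF0 r) (pvF0 r) (pvF1 r) (fun x hx => hlen x (by simp [hx]))]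
        rfl
    · simp [h1, h2]
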